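-- pv_equiv track=rewrite | github.com/godzmdi93/Uncertainty-Aware-DRL | u_helper.py | draw_u
-- ===== SOURCE A (Python) =====
-- def draw_u(action,a,d):
--
--     count1 = 0
--     count2 = 0
--     count3 = 0
--     count4 = 0
--     count5 = 0
--     t = 0
--     f = []
--     for i in range(len(a)):
--         if a[i] == action:
--             t+=1
--             if d[i] == 0:
--                 count1+=1
--             if d[i] == 1:
--                 count2+=1
--             if d[i] == 2:
--                 count3+=1
--             if d[i] == 3:
--                 count4+=1
--             if d[i] == -1:
--                 count5+=1
--             f.append([count1,count2,count3,count4,count5])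
--     return f
-- ===== SOURCE B (Python) =====
-- def draw_u(action, a, d):
--     matched = [dv for av, dv in zip(a, d) if av == action]
--
--     def cum(c):
--         out, s = [], 0
--         for x in matched:
--             s += 1 if x == c else 0
--             out.append(s)
--         return out
--
--     cols = [cum(c) for c in (0, 1, 2, 3, -1)]
--     return [list(row) for row in zip(*cols)]
-- ===== Notes on version B (the rewrite author's own statement) =====
-- stated objective: alternative
-- what changed: A's single pass with five running counters appended row by row is replaced by filtering the matched d-values once and computing five columnar cumulative-count lists (one per category 0,1,2,3,-1) that are stitched into rows by a 5-way zip.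
import Mathlib
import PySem

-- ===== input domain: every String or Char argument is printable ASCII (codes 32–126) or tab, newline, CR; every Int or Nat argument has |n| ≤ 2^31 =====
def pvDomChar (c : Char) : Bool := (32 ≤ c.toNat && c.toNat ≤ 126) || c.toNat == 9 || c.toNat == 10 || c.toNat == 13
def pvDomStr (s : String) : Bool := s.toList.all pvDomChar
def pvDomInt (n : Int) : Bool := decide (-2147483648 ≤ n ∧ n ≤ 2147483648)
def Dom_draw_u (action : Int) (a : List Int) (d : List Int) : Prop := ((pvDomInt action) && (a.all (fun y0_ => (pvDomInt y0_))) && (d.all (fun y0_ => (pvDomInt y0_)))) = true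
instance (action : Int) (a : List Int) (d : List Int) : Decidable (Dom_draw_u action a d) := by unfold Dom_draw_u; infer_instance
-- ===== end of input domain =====

-- B replaces A's single running-counter row loop by five columnar cumulative-count passes over
-- the matched d-values, stitched together by a 5-way zip (objective: alternative decomposition).

-- ===== PORT A =====
structure SA where
  c1 : Int
  c2 : Int
  c3 : Int
  c4 : Int
  c5 : Int
  t : Int
  f : List (List Int)
deriving Repr, DecidableEq

def pvStepA (action : Int) (a d : List Int) (st : SA) (i : Int) : SA :=
  if PySem.List.pyGetD a i 0 == action then
    let t := st.t + 1
    let c1 := if PySem.List.pyGetD d i 0 == 0 then st.c1 + 1 else st.c1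
    let c2 := if PySem.List.pyGetD d i 0 == 1 then st.c2 + 1 else st.c2
    let c3 := if PySem.List.pyGetD d i 0 == 2 then st.c3 + 1 else st.c3
    let c4 := if PySem.List.pyGetD d i 0 == 3 then st.c4 + 1 else st.c4
    let c5 := if PySem.List.pyGetD d i 0 == -1 then st.c5 + 1 else st.c5
    ⟨c1, c2, c3, c4, c5, t, st.f ++ [[c1, c2, c3, c4, c5]]⟩
  else st

def draw_u (action : Int) (a : List Int) (d : List Int) : List (List Int) :=
  ((PySem.List.pyRange 0 (PySem.List.len a) 1).foldl (pvStepA action a d)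
    ⟨0, 0, 0, 0, 0, 0, []⟩).f

-- ===== PORT B =====
def pvMatched (action : Int) (a d : List Int) : List Int :=
  ((a.zip d).filter (fun p => p.1 == action)).map Prod.snd

def pvCum (c : Int) (xs : List Int) : List Int :=
  (xs.foldl (fun (p : List Int × Int) x =>
      (p.1 ++ [p.2 + (if x == c then (1 : Int) else 0)],
       p.2 + (if x == c then (1 : Int) else 0))) ([], 0)).1

def pvZip5 : List Int → List Int → List Int → List Int → List Int → List (List Int)
  | x1 :: t1, x2 :: t2, x3 :: t3, x4 :: t4, x5 :: t5 =>
      [x1, x2, x3, x4, x5] :: pvZip5 t1 t2 t3 t4 t5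
  | _, _, _, _, _ => []

def draw_u_alt (action : Int) (a : List Int) (d : List Int) : List (List Int) :=
  let m := pvMatched action a d
  pvZip5 (pvCum 0 m) (pvCum 1 m) (pvCum 2 m) (pvCum 3 m) (pvCum (-1) m)

-- ===== PRECONDITION & SPEC =====
-- Pre_ excludes exactly the inputs where A raises IndexError: some index i with a[i] == action
-- has no d[i] (d is too short there).
def Pre_draw_u (action : Int) (a : List Int) (d : List Int) : Prop :=
  ∀ i : Nat, i < a.length → (a.getD i 0 = action → i < d.length)
instance (action : Int) (a : List Int) (d : List Int) : Decidable (Pre_draw_u action a d) := by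
  unfold Pre_draw_u; infer_instance

def pvWitness_draw_u : Int × List Int × List Int := (1, [1, 0, 1], [2, -1, 0])

def Spec_draw_u (action : Int) (a : List Int) (d : List Int) (out : List (List Int)) : Prop := out = draw_u_alt action a d
instance (action : Int) (a : List Int) (d : List Int) (out : List (List Int)) : Decidable (Spec_draw_u action a d out) := by unfold Spec_draw_u; infer_instance

-- ===== CLAIM (what is proved, stated in full; the proofs are below) =====
def Claim_equal_draw_u : Prop := ∀ (action : Int) (a : List Int) (d : List Int), Dom_draw_u action a d → Pre_draw_u action a d → Spec_draw_u action a d (draw_u action a d)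

-- ===== LEMMAS AND PROOFS =====

-- reference cumulative-row builder, the common denominator of both proofs
def pvSpecA : List Int → Int → Int → Int → Int → Int → List (List Int)
  | [], _, _, _, _, _ => []
  | x :: xs, c1, c2, c3, c4, c5 =>
    let c1' := if x == 0 then c1 + 1 else c1
    let c2' := if x == 1 then c2 + 1 else c2
    let c3' := if x == 2 then c3 + 1 else c3
    let c4' := if x == 3 then c4 + 1 else c4
    let c5' := if x == -1 then c5 + 1 else c5
    [c1', c2', c3', c4', c5'] :: pvSpecA xs c1' c2' c3' c4' c5'

def pvCumF (c : Int) : List Int → Int → List Int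
  | [], _ => []
  | x :: xs, s => (s + (if x == c then 1 else 0)) :: pvCumF c xs (s + (if x == c then 1 else 0))

lemma pvAddIf (b : Bool) (c : Int) :
    c + (if b = true then (1 : Int) else 0) = if b = true then c + 1 else c := by
  cases b <;> simp

-- A's loop body, seen on the pair (a[i], d[i])
def pvStepP (action : Int) (st : SA) (p : Int × Int) : SA :=
  if p.1 == action then
    let t := st.t + 1
    let c1 := if p.2 == 0 then st.c1 + 1 else st.c1
    let c2 := if p.2 == 1 then st.c2 + 1 else st.c2
    let c3 := if p.2 == 2 then st.c3 + 1 else st.c3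
    let c4 := if p.2 == 3 then st.c4 + 1 else st.c4
    let c5 := if p.2 == -1 then st.c5 + 1 else st.c5
    ⟨c1, c2, c3, c4, c5, t, st.f ++ [[c1, c2, c3, c4, c5]]⟩
  else st

lemma pvCum_eq_cumF (c : Int) : ∀ (xs : List Int) (acc : List Int) (s : Int),
    (xs.foldl (fun (p : List Int × Int) x =>
      (p.1 ++ [p.2 + (if x == c then (1 : Int) else 0)],
       p.2 + (if x == c then (1 : Int) else 0))) (acc, s)).1 = acc ++ pvCumF c xs s := by
  intro xs
  induction xs with
  | nil => intro acc s; simp [pvCumF]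
  | cons x xs ih =>
      intro acc s
      simp only [List.foldl_cons, pvCumF]
      rw [ih]
      simp

lemma pvZip5_cumF : ∀ (m : List Int) (c1 c2 c3 c4 c5 : Int),
    pvZip5 (pvCumF 0 m c1) (pvCumF 1 m c2) (pvCumF 2 m c3) (pvCumF 3 m c4) (pvCumF (-1) m c5)
      = pvSpecA m c1 c2 c3 c4 c5 := by
  intro m
  induction m with
  | nil => intro c1 c2 c3 c4 c5; simp [pvCumF, pvSpecA, pvZip5]
  | cons x xs ih =>
      intro c1 c2 c3 c4 c5
      simp only [pvCumF, pvSpecA, pvZip5, pvAddIf, ih]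

lemma pvPairs_eq : ∀ (a d : List Int),
    (List.range a.length).map (fun i => (a.getD i 0, d.getD i 0))
      = a.zip d ++ (a.drop d.length).map (fun x => (x, (0 : Int))) := by
  intro a
  induction a with
  | nil => intro d; simp
  | cons x a' ih =>
      intro d
      rw [List.length_cons, List.range_succ_eq_map, List.map_cons, List.map_map]
      have hfun : ((fun i => ((x :: a').getD i 0, d.getD i 0)) ∘ Nat.succ)
          = fun i => (a'.getD i 0, d.tail.getD i 0) := by
        funext i
        cases d <;> simp [List.getD]
      rw [hfun, ih]
      cases d with
      | nil => simp
      | cons y d' => simp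

lemma pvFoldP_filter (action : Int) : ∀ (l : List (Int × Int)) (st : SA),
    l.foldl (pvStepP action) st
      = (l.filter (fun p => p.1 == action)).foldl (pvStepP action) st := by
  intro l
  induction l with
  | nil => intro st; rfl
  | cons p l ih =>
      intro st
      by_cases h : p.1 == action
      · simp only [List.foldl_cons, List.filter_cons, h, List.foldl_cons]
        exact ih _
      · simp only [List.foldl_cons, List.filter_cons, h]
        rw [show pvStepP action st p = st by simp [pvStepP, h]]
        exact ih st

lemma pvFoldP_specA (action : Int) : ∀ (l : List (Int × Int)),
    (∀ p ∈ l, p.1 == action) → ∀ (c1 c2 c3 c4 c5 t : Int) (f : List (List Int)),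
    (l.foldl (pvStepP action) ⟨c1, c2, c3, c4, c5, t, f⟩).f
      = f ++ pvSpecA (l.map Prod.snd) c1 c2 c3 c4 c5 := by
  intro l
  induction l with
  | nil => intro _ c1 c2 c3 c4 c5 t f; simp [pvSpecA]
  | cons p l ih =>
      intro h c1 c2 c3 c4 c5 t f
      have hp : p.1 == action := h p (List.mem_cons_self ..)
      simp only [List.foldl_cons, List.map_cons, pvSpecA, pvStepP, hp, if_pos]
      rw [ih (fun q hq => h q (List.mem_cons_of_mem _ hq))]
      simp

-- ===== VERDICT (by name: the statement is the Claim_ definition above) =====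
theorem draw_u_spec : Claim_equal_draw_u := by
  intro action a d _ hpre
  show draw_u action a d = draw_u_alt action a d
  have hrange : (PySem.List.pyRange 0 (PySem.List.len a) 1)
      = (List.range a.length).map (fun k : Nat => (k : Int)) := by
    rw [PySem.List.pyRange_one]
    simp [PySem.List.len]
  have h1 : draw_u action a d
      = (((List.range a.length).map (fun i => (a.getD i 0, d.getD i 0))).foldl
          (pvStepP action) ⟨0, 0, 0, 0, 0, 0, []⟩).f := by
    unfold draw_u
    rw [hrange, List.foldl_map, List.foldl_map]
    have hfun : (fun (st : SA) (k : Nat) => pvStepA action a d st ↑k)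
        = fun (st : SA) (k : Nat) => pvStepP action st (a.getD k 0, d.getD k 0) := by
      funext st k; simp [pvStepA, pvStepP]
    rw [hfun]
  have hextra : ((a.drop d.length).map (fun x => (x, (0 : Int)))).filter
      (fun p => p.1 == action) = [] := by
    rw [List.filter_eq_nil_iff]
    intro p hp
    rw [List.mem_map] at hp
    obtain ⟨x, hx, rfl⟩ := hp
    obtain ⟨j, hj, rfl⟩ := List.mem_iff_getElem.mp hx
    simp only [List.getElem_drop, beq_iff_eq]
    intro hEq
    have hlen : d.length + j < a.length := by
      simp [List.length_drop] at hj; omega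
    have h := hpre (d.length + j) hlen (by
      rw [List.getD_eq_getElem?_getD, List.getElem?_eq_getElem hlen]
      simpa using hEq)
    omega
  have h2 : draw_u action a d = pvSpecA (pvMatched action a d) 0 0 0 0 0 := by
    rw [h1, pvPairs_eq, pvFoldP_filter, List.filter_append, hextra, List.append_nil]
    rw [pvFoldP_specA action _ (fun p hp => (List.mem_filter.mp hp).2)]
    simp [pvMatched]
  have h3 : ∀ c : Int, pvCum c (pvMatched action a d) = pvCumF c (pvMatched action a d) 0 := by
    intro c; unfold pvCum; rw [pvCum_eq_cumF]; simp
  rw [h2]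
  simp only [draw_u_alt]
  rw [h3 0, h3 1, h3 2, h3 3, h3 (-1), pvZip5_cumF]
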